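-- pv_equiv track=rewrite | github.com/3211133/ageent_agora_bitothello | src/play_cli.py | bit_to_pos
-- ===== SOURCE A (Python) =====
-- def bit_to_pos(bit: int) -> str:
--     idx = 0
--     while bit >> idx:
--         if bit & (1 << idx):
--             break
--         idx += 1
--     row = idx // 8
--     col = idx % 8
--     return f"{chr(col + ord('a'))}{row + 1}"
-- ===== SOURCE B (Python) =====
-- def bit_to_pos(bit: int) -> str:
--     idx = (bit & -bit).bit_length() - 1 if bit else 0
--     return f"{chr(idx % 8 + ord('a'))}{idx // 8 + 1}"
-- ===== Notes on version B (the rewrite author's own statement) =====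
-- stated objective: simpler
-- what changed: Replaces the bit-scanning while loop with the closed form (bit & -bit).bit_length() - 1 that isolates the lowest set bit and reads its index directly (0 for bit == 0, as in A).
import Mathlib
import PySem

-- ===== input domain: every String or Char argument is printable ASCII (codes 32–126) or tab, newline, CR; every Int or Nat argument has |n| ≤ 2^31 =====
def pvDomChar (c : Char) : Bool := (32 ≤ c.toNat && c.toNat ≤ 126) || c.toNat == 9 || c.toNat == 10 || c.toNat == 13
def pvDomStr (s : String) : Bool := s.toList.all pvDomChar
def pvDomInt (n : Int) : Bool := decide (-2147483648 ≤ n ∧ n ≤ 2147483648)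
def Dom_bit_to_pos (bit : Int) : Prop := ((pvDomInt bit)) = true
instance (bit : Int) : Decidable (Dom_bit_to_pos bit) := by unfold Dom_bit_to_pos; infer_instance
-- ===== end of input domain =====

-- B replaces A's bit-scanning while loop by the closed form (bit & -bit).bit_length() - 1
-- (with index 0 for bit == 0, as in A); return values agree on the whole domain.

-- ===== PORT A =====
-- The while loop, as structural recursion on a fuel counter (64 steps suffice for every
-- |bit| ≤ 2^31; the fuel only makes the same computation total).  idx is kept as a Nat
-- since Python's idx starts at 0 and only ever increases, so // and % match Nat / and %.
def bitToPosLoop (bit : Int) : Nat → Nat → Nat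
  | 0, idx => idx
  | fuel + 1, idx =>
    if bit >>> idx ≠ 0 then                                   -- while bit >> idx:
      if PySem.Int.band bit ((1 : Int) <<< idx) ≠ 0 then idx  --   if bit & (1 << idx): break
      else bitToPosLoop bit fuel (idx + 1)                    --   idx += 1
    else idx

def bit_to_pos (bit : Int) : String :=
  let idx := bitToPosLoop bit 64 0
  let row := idx / 8                                          -- row = idx // 8
  let col := idx % 8                                          -- col = idx % 8
  String.ofList (Char.ofNat (col + 97) :: PySem.Int.toChars (((row : Nat) : Int) + 1))
    -- f"{chr(col + ord('a'))}{row + 1}"  (ord('a') = 97)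

-- ===== PORT B =====
def bit_to_pos_alt (bit : Int) : String :=
  let idx := if bit = 0 then 0 else PySem.Int.bitLength (PySem.Int.band bit (-bit)) - 1
  String.ofList (Char.ofNat (idx % 8 + 97) :: PySem.Int.toChars (((idx / 8 : Nat) : Int) + 1))

-- ===== PRECONDITION & SPEC =====
def Spec_bit_to_pos (bit : Int) (out : String) : Prop := out = bit_to_pos_alt bit
instance (bit : Int) (out : String) : Decidable (Spec_bit_to_pos bit out) := by unfold Spec_bit_to_pos; infer_instance

-- ===== CLAIM (what is proved, stated in full; the proofs are below) =====
def Claim_equal_bit_to_pos : Prop := ∀ (bit : Int), Dom_bit_to_pos bit → Spec_bit_to_pos bit (bit_to_pos bit)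

-- ===== LEMMAS AND PROOFS =====

-- Bits of n = 2^k * (2m+1): zero strictly below k, one at k; for n - 1 the opposite.
lemma testBit_pow_mul_lt (k m : Nat) : ∀ i < k, (2 ^ k * (2 * m + 1)).testBit i = false := by
  induction k with
  | zero => omega
  | succ k ih =>
    intro i hi
    cases i with
    | zero =>
      have : 2 ^ (k+1) * (2*m+1) = 2 * (2 ^ k * (2*m+1)) := by ring
      rw [this]; simp [Nat.testBit_zero]
    | succ j =>
      rw [Nat.testBit_succ]
      have : 2 ^ (k+1) * (2*m+1) / 2 = 2 ^ k * (2*m+1) := by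
        have : 2 ^ (k+1) * (2*m+1) = 2 * (2 ^ k * (2*m+1)) := by ring
        omega
      rw [this]; exact ih j (by omega)

lemma testBit_pow_mul_self (k m : Nat) : (2 ^ k * (2 * m + 1)).testBit k = true := by
  induction k with
  | zero => simp [Nat.testBit_zero]
  | succ k ih =>
    rw [Nat.testBit_succ]
    have : 2 ^ (k+1) * (2*m+1) / 2 = 2 ^ k * (2*m+1) := by
      have : 2 ^ (k+1) * (2*m+1) = 2 * (2 ^ k * (2*m+1)) := by ring
      omega
    rw [this]; exact ih

lemma testBit_pred_lt (k m : Nat) : ∀ i < k, (2 ^ k * (2 * m + 1) - 1).testBit i = true := by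
  induction k with
  | zero => omega
  | succ k ih =>
    intro i hi
    have h2 : 2 ^ (k+1) * (2*m+1) = 2 * (2 ^ k * (2*m+1)) := by ring
    have hpos : 0 < 2 ^ k * (2*m+1) := by positivity
    cases i with
    | zero => rw [h2]; simp [Nat.testBit_zero]; omega
    | succ j =>
      rw [Nat.testBit_succ]
      have : (2 ^ (k+1) * (2*m+1) - 1) / 2 = 2 ^ k * (2*m+1) - 1 := by omega
      rw [this]; exact ih j (by omega)

lemma testBit_pred_self (k m : Nat) : (2 ^ k * (2 * m + 1) - 1).testBit k = false := by
  induction k with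
  | zero => simp [Nat.testBit_zero]
  | succ k ih =>
    rw [Nat.testBit_succ]
    have h2 : 2 ^ (k+1) * (2*m+1) = 2 * (2 ^ k * (2*m+1)) := by ring
    have hpos : 0 < 2 ^ k * (2*m+1) := by positivity
    have : (2 ^ (k+1) * (2*m+1) - 1) / 2 = 2 ^ k * (2*m+1) - 1 := by omega
    rw [this]; exact ih

-- n & (n-1) clears the lowest set bit.
lemma and_pred (k m : Nat) :
    (2 ^ k * (2 * m + 1)) &&& (2 ^ k * (2 * m + 1) - 1) = 2 ^ k * (2 * m) := by
  induction k with
  | zero =>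
    simp only [pow_zero, one_mul]
    apply Nat.eq_of_testBit_eq
    intro i
    cases i with
    | zero => simp [Nat.testBit_zero]
    | succ j =>
      rw [Nat.testBit_land, Nat.testBit_succ, Nat.testBit_succ, Nat.testBit_succ]
      have h1 : (2*m+1-1)/2 = m := by omega
      have h2 : (2*m+1)/2 = m := by omega
      have h3 : (2*m)/2 = m := by omega
      rw [h1, h2, h3, Bool.and_self]
  | succ k ih =>
    have hpos : 0 < 2 ^ k * (2*m+1) := by positivity
    have h2 : 2 ^ (k+1) * (2*m+1) = 2 * (2 ^ k * (2*m+1)) := by ring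
    have h3 : 2 ^ (k+1) * (2*m) = 2 * (2 ^ k * (2*m)) := by ring
    apply Nat.eq_of_testBit_eq
    intro i
    cases i with
    | zero => rw [h2, h3]; simp [Nat.testBit_zero]
    | succ j =>
      rw [Nat.testBit_land, Nat.testBit_succ, Nat.testBit_succ, Nat.testBit_succ]
      have e1 : 2 ^ (k+1) * (2*m+1) / 2 = 2 ^ k * (2*m+1) := by omega
      have e2 : (2 ^ (k+1) * (2*m+1) - 1) / 2 = 2 ^ k * (2*m+1) - 1 := by omega
      have e3 : 2 ^ (k+1) * (2*m) / 2 = 2 ^ k * (2*m) := by omega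
      rw [e1, e2, e3, ← Nat.testBit_land, ih]

-- For either sign of bit with |bit| = n, Python's bit & -bit is n - (n & (n-1)).
lemma band_neg_isolate (bit : Int) (n : Nat) (hpos : 0 < n) (h : bit.natAbs = n) :
    PySem.Int.band bit (-bit) = ((n - (n &&& (n - 1)) : Nat) : Int) := by
  rcases lt_trichotomy bit 0 with hb | hb | hb
  · have hbe : bit = -(n : Int) := by omega
    subst hbe
    simp only [PySem.Int.band, neg_neg]
    rw [if_neg (by omega), if_pos (by omega)]
    have e1 : ((n : Int)).toNat = n := by omega
    have e2 : ((n : Int) - 1).toNat = n - 1 := by omega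
    rw [e1, e2]
  · omega
  · have hbe : bit = (n : Int) := by omega
    subst hbe
    simp only [PySem.Int.band, neg_neg]
    rw [if_pos (by omega), if_neg (by omega)]
    have e1 : ((n : Int)).toNat = n := by omega
    have e2 : ((n : Int) - 1).toNat = n - 1 := by omega
    rw [e1, e2]

-- bit & -bit isolates the lowest set bit.
lemma band_neg_self (bit : Int) (k m : Nat) (h : bit.natAbs = 2 ^ k * (2 * m + 1)) :
    PySem.Int.band bit (-bit) = ((2 ^ k : Nat) : Int) := by
  have hpos : 0 < 2 ^ k * (2 * m + 1) := by positivity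
  rw [band_neg_isolate bit _ hpos h, and_pred]
  rw [Nat.sub_eq_of_eq_add (by ring : 2 ^ k * (2 * m + 1) = 2 ^ k + 2 ^ k * (2 * m))]

lemma bitLength_two_pow (k : Nat) : PySem.Int.bitLength ((2 ^ k : Nat) : Int) = k + 1 := by
  induction k with
  | zero => decide
  | succ k ih =>
    rw [PySem.Int.bitLength_natCast (by positivity)]
    have : 2 ^ (k+1) / 2 = 2 ^ k := by omega
    rw [this, ih]

lemma one_shiftLeft_int (i : Nat) : (1 : Int) <<< i = ((2 ^ i : Nat) : Int) := by
  induction i with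
  | zero => decide
  | succ k ih => rw [Int.shiftLeft_succ, ih]; push_cast [pow_succ]; ring

-- Loop-guard facts: bit >> i is nonzero for i ≤ k; bit & (1 << i) is zero below k, nonzero at k.
lemma shiftRight_ne_zero (bit : Int) (k m : Nat) (h : bit.natAbs = 2 ^ k * (2 * m + 1))
    (i : Nat) (hi : i ≤ k) : bit >>> i ≠ 0 := by
  have hpow : (0:Int) < ((2 ^ i : Nat) : Int) := by positivity
  rw [Int.shiftRight_eq_div_pow]
  rcases lt_trichotomy bit 0 with hb | hb | hb
  · have : bit / ((2 ^ i : Nat) : Int) < 0 := Int.ediv_neg_of_neg_of_pos hb hpow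
    omega
  · subst hb; simp at h
  · have hle : ((2 ^ i : Nat) : Int) ≤ bit := by
      have h1 : 2 ^ i ≤ 2 ^ k * (2 * m + 1) := le_trans (Nat.pow_le_pow_right (by omega) hi)
        (Nat.le_mul_of_pos_right _ (by omega))
      omega
    have : (1:Int) ≤ bit / ((2 ^ i : Nat) : Int) := by
      rw [Int.le_ediv_iff_mul_le hpow]; omega
    omega

lemma band_pow_lt (bit : Int) (k m : Nat) (h : bit.natAbs = 2 ^ k * (2 * m + 1))
    (i : Nat) (hi : i < k) : PySem.Int.band bit ((1:Int) <<< i) = 0 := by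
  rw [one_shiftLeft_int]
  rcases lt_trichotomy bit 0 with hb | hb | hb
  · have hbe : bit = -((2 ^ k * (2 * m + 1) : Nat) : Int) := by omega
    subst hbe
    have hpos : 0 < 2 ^ k * (2 * m + 1) := by positivity
    simp only [PySem.Int.band]
    rw [if_neg (by omega), if_pos (by positivity)]
    have e1 : (((2 ^ i : Nat) : Int)).toNat = 2 ^ i := by norm_cast
    have e2 : (-(-((2 ^ k * (2 * m + 1) : Nat) : Int)) - 1).toNat = 2 ^ k * (2 * m + 1) - 1 := by
      have : 0 < 2 ^ k * (2 * m + 1) := by positivity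
      omega
    rw [e1, e2, Nat.land_comm, Nat.and_two_pow, testBit_pred_lt k m i hi]
    simp
  · subst hb; simp at h
  · have hbe : bit = ((2 ^ k * (2 * m + 1) : Nat) : Int) := by omega
    subst hbe
    rw [PySem.Int.band_natCast, Nat.and_two_pow, testBit_pow_mul_lt k m i hi]
    simp

lemma band_pow_self (bit : Int) (k m : Nat) (h : bit.natAbs = 2 ^ k * (2 * m + 1)) :
    PySem.Int.band bit ((1:Int) <<< k) ≠ 0 := by
  rw [one_shiftLeft_int]
  have hp : (0:Nat) < 2 ^ k := by positivity
  rcases lt_trichotomy bit 0 with hb | hb | hb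
  · have hbe : bit = -((2 ^ k * (2 * m + 1) : Nat) : Int) := by omega
    subst hbe
    have hpos : 0 < 2 ^ k * (2 * m + 1) := by positivity
    simp only [PySem.Int.band]
    rw [if_neg (by omega), if_pos (by positivity)]
    have e1 : (((2 ^ k : Nat) : Int)).toNat = 2 ^ k := by norm_cast
    have e2 : (-(-((2 ^ k * (2 * m + 1) : Nat) : Int)) - 1).toNat = 2 ^ k * (2 * m + 1) - 1 := by
      have : 0 < 2 ^ k * (2 * m + 1) := by positivity
      omega
    rw [e1, e2, Nat.land_comm, Nat.and_two_pow, testBit_pred_self k m]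
    simp
  · subst hb; simp at h
  · have hbe : bit = ((2 ^ k * (2 * m + 1) : Nat) : Int) := by omega
    subst hbe
    rw [PySem.Int.band_natCast, Nat.and_two_pow, testBit_pow_mul_self k m]
    simp

-- The scan loop lands exactly on k, the index of the lowest set bit.
lemma loop_eq (bit : Int) (k m : Nat) (h : bit.natAbs = 2 ^ k * (2 * m + 1)) :
    ∀ fuel j, j ≤ k → k - j < fuel → bitToPosLoop bit fuel j = k := by
  intro fuel
  induction fuel with
  | zero => omega
  | succ fuel ih =>
    intro j hj hf
    rw [bitToPosLoop, if_pos (shiftRight_ne_zero bit k m h j hj)]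
    by_cases hjk : j = k
    · subst hjk
      rw [if_pos (band_pow_self bit j m h)]
    · rw [if_neg (by simp [band_pow_lt bit k m h j (by omega)])]
      exact ih (j + 1) (by omega) (by omega)

-- ===== VERDICT (by name: the statement is the Claim_ definition above) =====
theorem bit_to_pos_spec : Claim_equal_bit_to_pos := by
  intro bit hdom
  unfold Spec_bit_to_pos
  by_cases hb : bit = 0
  · subst hb; decide
  · have hn : bit.natAbs ≠ 0 := by omega
    obtain ⟨k, m', hodd, hnm⟩ := Nat.exists_eq_two_pow_mul_odd hn
    obtain ⟨m, rfl⟩ := hodd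
    have h : bit.natAbs = 2 ^ k * (2 * m + 1) := hnm
    have hk : k ≤ 31 := by
      have h1 : 2 ^ k ≤ bit.natAbs :=
        le_trans (Nat.le_mul_of_pos_right _ (by omega)) h.ge
      have h2 : bit.natAbs ≤ 2 ^ 31 := by
        simp [Dom_bit_to_pos, pvDomInt] at hdom; omega
      have := le_trans h1 h2
      exact (Nat.pow_le_pow_iff_right (by omega)).mp this
    unfold bit_to_pos bit_to_pos_alt
    rw [loop_eq bit k m h 64 0 (by omega) (by omega),
        if_neg hb, band_neg_self bit k m h, bitLength_two_pow k]
    simp
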